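-- pv_equiv track=rewrite | github.com/dmitri-mamrukov/coursera-data-structures-and-algorithms | course4-strings/assignments/assignment_003_suffix_array_matching/suffix_array_matching.py | _compute_char_classes
-- ===== SOURCE A (Python) =====
-- def _compute_char_classes(word, order):
--     """
--     Computes equivalence classes of the partial cyclic shift.
--
--     Theory:
--
--         Let Ci be a partial cyclic shift of length L starting in position i.
--
--         Ci can be equal to Cj, then they are in one equivalence class.
--
--         This method computes class[i] number of different cyclic shifts of
--         length L that are strictly smaller than Ci.
--
--         Ci == Cj means that class[i] == class[j].
--
--     Example:
--
--         (See the introductory explanation in _sort_chars(word).)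
--
--         S = ababaa$
--
--         order = [ 6, 0, 2, 4, 5, 1, 3 ]
--
--         order char
--         6     $
--         0     a
--         2     a
--         4     a
--         5     a
--         1     b
--         3     b
--
--         Assign 0 to the smallest of the cyclic shifts of the current length.
--         char = $ (position 6)
--         class = [ _, _, _, _, _, _, 0 ]
--
--         The next smallest cyclic shift is 'a', and it's different from the
--         previous one ('$'). So we need a new equivalence class for 'a'.
--         char = a (position 0)
--         class = [ 1, _, _, _, _, _, 0 ]
--
--         The next smallest cyclic shift is 'a', and it's the same as the
--         previous one ('a'). So we assign 1 to it.
--         char = a (position 2)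
--         class = [ 1, _, 1, _, _, _, 0 ]
--
--         The next smallest cyclic shift is 'a', and it's the same as the
--         previous one ('a'). So we assign 1 to it.
--         char = a (position 4)
--         class = [ 1, _, 1, _, 1, _, 0 ]
--
--         The next smallest cyclic shift is 'a', and it's the same as the
--         previous one ('a'). So we assign 1 to it.
--         char = a (position 5)
--         class = [ 1, _, 1, _, 1, 1, 0 ]
--
--         The next smallest cyclic shift is 'b', and it's different from the
--         previous one ('a'). So we need a new equivalence class for 'b'.
--         char = b (position 1)
--         class = [ 1, 2, 1, _, 1, 1, 0 ]
--
--         The next smallest cyclic shift is 'b', and it's the same as the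
--         previous one ('b'). So we assign 1 to it.
--         char = b (position 3)
--         class = [ 1, 2, 1, 2, 1, 1, 0 ]
--
--         Now we know the classes of all the single character cyclic shifts.
--         The $ is in equivalence class 0. The 4 a's are in equivalence
--         class 1. The 2 b's are in equivalence class 2.
--
--     Note: The maximum value in the class array for some string S is
--     the number of different characters in the initial string s (before
--     adding '$').
--     """
--
--     if len(word) == 0:
--         return []
--
--     eq_class = [ 0 ] * len(word)
--     eq_class[order[0]] = 0
--     for i in range(1, len(word)):
--         if word[order[i]] != word[order[i - 1]]:
--              eq_class[order[i]] = eq_class[order[i - 1]] + 1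
--         else:
--              eq_class[order[i]] = eq_class[order[i - 1]]
--
--     return eq_class
-- ===== SOURCE B (Python) =====
-- def _compute_char_classes(word, order):
--     if len(word) == 0:
--         return []
--     n = len(word)
--     ps = order[:n]
--     runs = []
--     run = [ps[0]]
--     for p in ps[1:]:
--         if word[p] == word[run[-1]]:
--             run.append(p)
--         else:
--             runs.append(run)
--             run = [p]
--     runs.append(run)
--     eq_class = [0] * n
--     for g, grp in enumerate(runs):
--         for p in grp:
--             eq_class[p] = g
--     return eq_class
-- ===== Notes on version B (the rewrite author's own statement) =====
-- stated objective: alternative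
-- what changed: B first slices the used prefix of order, groups it into maximal runs of positions with equal characters, then numbers the runs 0,1,2,... and scatters each run's number, instead of A's element-by-element loop that threads a running counter through reads of the partially built class array.
import Mathlib
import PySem

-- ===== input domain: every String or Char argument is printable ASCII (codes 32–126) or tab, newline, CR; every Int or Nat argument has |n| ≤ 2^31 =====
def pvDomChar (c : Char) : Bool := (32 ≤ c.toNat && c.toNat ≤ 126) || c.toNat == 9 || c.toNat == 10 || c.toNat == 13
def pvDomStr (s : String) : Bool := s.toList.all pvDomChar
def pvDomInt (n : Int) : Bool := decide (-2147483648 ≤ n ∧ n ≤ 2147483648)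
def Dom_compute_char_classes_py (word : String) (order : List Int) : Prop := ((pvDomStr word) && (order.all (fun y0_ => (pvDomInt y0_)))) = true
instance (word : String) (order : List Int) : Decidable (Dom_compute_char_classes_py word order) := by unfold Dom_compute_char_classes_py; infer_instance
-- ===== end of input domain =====

-- B builds maximal runs of equal-character positions from order's used prefix, numbers them, and scatters the numbers (alternative decomposition of A's running-counter loop; return values proved equal on Pre_).


-- ===== PORT A =====
def compute_char_classes_py (word : String) (order : List Int) : List Int :=
  if PySem.Str.len word = 0 then []
  else
    let n : Nat := word.toList.length
    let eq0 := List.replicate n (0 : Int)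
    let eq1 := PySem.List.pySetD eq0 (PySem.List.pyGetD order 0 0) 0
    (PySem.List.pyRange 1 (n : Int) 1).foldl (fun eqc i =>
      if PySem.Str.pyGet? word (PySem.List.pyGetD order i 0)
         ≠ PySem.Str.pyGet? word (PySem.List.pyGetD order (i - 1) 0) then
        PySem.List.pySetD eqc (PySem.List.pyGetD order i 0)
          (PySem.List.pyGetD eqc (PySem.List.pyGetD order (i - 1) 0) 0 + 1)
      else
        PySem.List.pySetD eqc (PySem.List.pyGetD order i 0)
          (PySem.List.pyGetD eqc (PySem.List.pyGetD order (i - 1) 0) 0)) eq1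

-- ===== PORT B =====
def compute_char_classes_py_alt (word : String) (order : List Int) : List Int :=
  if PySem.Str.len word = 0 then []
  else
    let n : Nat := word.toList.length
    let ps := PySem.List.slice order none (some (n : Int))
    match ps with
    | [] => []   -- Python B raises IndexError at ps[0] here (word nonempty, order empty); outside Pre_
    | p0 :: rest =>
      let st := rest.foldl (fun (st : List (List Int) × List Int) p =>
          if PySem.Str.pyGet? word p = PySem.Str.pyGet? word (PySem.List.pyGetD st.2 (-1) 0)
          then (st.1, st.2 ++ [p])
          else (st.1 ++ [st.2], [p])) ([], [p0])
      let runs := st.1 ++ [st.2]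
      let eq0 := List.replicate n (0 : Int)
      (runs.zipIdx).foldl (fun eqc rg =>
        rg.1.foldl (fun eqc p => PySem.List.pySetD eqc p ((rg.2 : Int))) eqc) eq0

-- ===== PRECONDITION & SPEC =====
-- Pre_ excludes exactly the inputs on which Python A raises IndexError: a nonempty word with
-- order shorter than the word, or with some used entry out of range [-len(word), len(word)).
def Pre_compute_char_classes_py (word : String) (order : List Int) : Prop :=
  word.toList = [] ∨
    (word.toList.length ≤ order.length ∧
     ∀ p ∈ order.take word.toList.length,
       -(word.toList.length : Int) ≤ p ∧ p < (word.toList.length : Int))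
instance (word : String) (order : List Int) : Decidable (Pre_compute_char_classes_py word order) := by
  unfold Pre_compute_char_classes_py; infer_instance

def pvWitness_compute_char_classes_py : String × List Int := ("aba", [2, 0, 1])

def Spec_compute_char_classes_py (word : String) (order : List Int) (out : List Int) : Prop :=
  out = compute_char_classes_py_alt word order
instance (word : String) (order : List Int) (out : List Int) : Decidable (Spec_compute_char_classes_py word order out) := by
  unfold Spec_compute_char_classes_py; infer_instance

-- ===== CLAIM (what is proved, stated in full; the proofs are below) =====
def Claim_equal_compute_char_classes_py : Prop :=
  ∀ (word : String) (order : List Int), Dom_compute_char_classes_py word order →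
    Pre_compute_char_classes_py word order →
    Spec_compute_char_classes_py word order (compute_char_classes_py word order)

-- ===== LEMMAS AND PROOFS =====
-- proof-side helpers
def pvG (order : List Int) (j : Nat) : Int := PySem.List.pyGetD order (j : Int) 0

def pvPairs (w : String) : Int → Int → List Int → List (Int × Int)
  | _, _, [] => []
  | c, q, p :: rest =>
    if PySem.Str.pyGet? w p ≠ PySem.Str.pyGet? w q then
      (p, c + 1) :: pvPairs w (c + 1) p rest
    else
      (p, c) :: pvPairs w c p rest

def pvScat (eqc : List Int) (l : List (Int × Int)) : List Int :=
  l.foldl (fun e pc => PySem.List.pySetD e pc.1 pc.2) eqc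

def pvNumb : Nat → List (List Int) → List (Int × Int)
  | _, [] => []
  | k, r :: rs => r.map (fun p => (p, (k : Int))) ++ pvNumb (k + 1) rs

def pvStep (w : String) (st : List (List Int) × List Int) (p : Int) : List (List Int) × List Int :=
  if PySem.Str.pyGet? w p = PySem.Str.pyGet? w (PySem.List.pyGetD st.2 (-1) 0)
  then (st.1, st.2 ++ [p])
  else (st.1 ++ [st.2], [p])

lemma pv_idx_lt (n : Nat) (q : Int) (h1 : -(n : Int) ≤ q) (h2 : q < n) :
    ∃ j, j < n ∧ PySem.List.pyIdx? n q = some j := by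
  unfold PySem.List.pyIdx?
  by_cases h : 0 ≤ q
  · exact ⟨q.toNat, by omega, by rw [if_pos h, if_pos h2]⟩
  · exact ⟨n - (-q).toNat, by omega, by rw [if_neg h, if_pos h1]⟩

lemma pv_get_set_self (xs : List Int) (q v d : Int)
    (h1 : -(xs.length : Int) ≤ q) (h2 : q < xs.length) :
    PySem.List.pyGetD (PySem.List.pySetD xs q v) q d = v := by
  obtain ⟨j, hj, hidx⟩ := pv_idx_lt xs.length q h1 h2
  unfold PySem.List.pySetD PySem.List.pySet? PySem.List.pyGetD PySem.List.pyGet?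
  rw [hidx]
  simp only [Option.map_some, Option.getD_some, List.length_set, hidx, Option.bind_some]
  rw [List.getElem?_eq_getElem (by simpa using hj)]
  simp [List.getElem_set_self]

-- A's loop over range(1, n) computes the scatter of the running-class pairs.
lemma pvA_loop (w : String) (order : List Int) (n : Nat)
    (H : ∀ j : Nat, j < n → -(n : Int) ≤ pvG order j ∧ pvG order j < (n : Int)) :
    ∀ (k i : Nat) (eqc : List Int) (c : Int), 1 ≤ i → i + k ≤ n → eqc.length = n →
    PySem.List.pyGetD eqc (PySem.List.pyGetD order ((i : Int) - 1) 0) 0 = c →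
    (PySem.List.pyRange (i : Int) ((i + k : Nat) : Int) 1).foldl (fun eqc i =>
      if PySem.Str.pyGet? w (PySem.List.pyGetD order i 0)
         ≠ PySem.Str.pyGet? w (PySem.List.pyGetD order (i - 1) 0) then
        PySem.List.pySetD eqc (PySem.List.pyGetD order i 0)
          (PySem.List.pyGetD eqc (PySem.List.pyGetD order (i - 1) 0) 0 + 1)
      else
        PySem.List.pySetD eqc (PySem.List.pyGetD order i 0)
          (PySem.List.pyGetD eqc (PySem.List.pyGetD order (i - 1) 0) 0)) eqc
      = pvScat eqc (pvPairs w c (PySem.List.pyGetD order ((i : Int) - 1) 0)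
          ((List.range' i k).map (pvG order))) := by
  intro k
  induction k with
  | zero =>
    intro i eqc c _ _ _ _
    rw [PySem.List.pyRange_one_eq_nil (by push_cast; omega)]
    simp [pvPairs, pvScat]
  | succ k ih =>
    intro i eqc c h1 h2 h3 h4
    rw [PySem.List.pyRange_one_cons (by push_cast; omega)]
    simp only [List.foldl_cons]
    have ei : ((i : Int) + 1) = ((i + 1 : Nat) : Int) := by push_cast; ring
    have eb : ((i + (k + 1) : Nat) : Int) = (((i + 1) + k : Nat) : Int) := by push_cast; ring
    have ei1 : (((i + 1 : Nat) : Int) - 1) = (i : Int) := by push_cast; ring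
    rw [h4, ei, eb]
    have hin := H i (by omega)
    have hlb : -((eqc.length : Int)) ≤ PySem.List.pyGetD order (i : Int) 0 := by
      rw [h3]; exact hin.1
    have hub : PySem.List.pyGetD order (i : Int) 0 < (eqc.length : Int) := by
      rw [h3]; exact hin.2
    rw [List.range'_succ, List.map_cons]
    by_cases h : PySem.Str.pyGet? w (PySem.List.pyGetD order (i : Int) 0)
        ≠ PySem.Str.pyGet? w (PySem.List.pyGetD order ((i : Int) - 1) 0)
    · rw [if_pos h]
      rw [ih (i + 1) _ (c + 1) (by omega) (by omega)
        (by rw [PySem.List.length_pySetD]; exact h3)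
        (by rw [ei1]; exact pv_get_set_self eqc _ (c + 1) 0 hlb hub)]
      rw [ei1]
      have hpp : pvPairs w c (PySem.List.pyGetD order ((i : Int) - 1) 0)
          (pvG order i :: (List.range' (i + 1) k).map (pvG order))
          = (pvG order i, c + 1) :: pvPairs w (c + 1) (pvG order i)
              ((List.range' (i + 1) k).map (pvG order)) := by
        simp only [pvPairs]
        rw [if_pos (by simpa [pvG] using h)]
      rw [hpp]
      rfl
    · rw [if_neg h]
      rw [ih (i + 1) _ c (by omega) (by omega)
        (by rw [PySem.List.length_pySetD]; exact h3)
        (by rw [ei1]; exact pv_get_set_self eqc _ c 0 hlb hub)]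
      rw [ei1]
      have hpp : pvPairs w c (PySem.List.pyGetD order ((i : Int) - 1) 0)
          (pvG order i :: (List.range' (i + 1) k).map (pvG order))
          = (pvG order i, c) :: pvPairs w c (pvG order i)
              ((List.range' (i + 1) k).map (pvG order)) := by
        simp only [pvPairs]
        rw [if_neg (by simpa [pvG] using h)]
      rw [hpp]
      rfl

-- the run-building fold only ever appends on the right of the runs component
lemma pv_shift (w : String) (rest : List Int) :
    ∀ (rs0 rs : List (List Int)) (run : List Int),
      rest.foldl (pvStep w) (rs0 ++ rs, run)
        = (rs0 ++ (rest.foldl (pvStep w) (rs, run)).1, (rest.foldl (pvStep w) (rs, run)).2) := by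
  induction rest with
  | nil => intro rs0 rs run; rfl
  | cons p rest ih =>
    intro rs0 rs run
    simp only [List.foldl_cons, pvStep]
    split_ifs with h
    · exact ih rs0 rs (run ++ [p])
    · rw [List.append_assoc]
      exact ih rs0 (rs ++ [run]) [p]

-- the numbered concatenation of the built runs is exactly the running-class pair list
lemma pv_runs (w : String) :
    ∀ (rest run : List Int) (k : Nat) (q : Int), run ≠ [] →
      PySem.List.pyGetD run (-1) 0 = q →
      pvNumb k ((rest.foldl (pvStep w) ([], run)).1 ++ [(rest.foldl (pvStep w) ([], run)).2])
        = run.map (fun p => (p, (k : Int))) ++ pvPairs w (k : Int) q rest := by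
  intro rest
  induction rest with
  | nil =>
    intro run k q _ _
    simp [pvNumb, pvPairs]
  | cons p rest ih =>
    intro run k q hne hq
    simp only [List.foldl_cons, pvStep, hq]
    by_cases h : PySem.Str.pyGet? w p = PySem.Str.pyGet? w q
    · rw [if_pos h]
      rw [ih (run ++ [p]) k p (by simp)
        (by simp [PySem.List.pyGetD_neg_one_append_singleton])]
      have h' : PySem.List.pyGet? w.toList p = PySem.List.pyGet? w.toList q := by simpa using h
      simp [pvPairs, h']
    · rw [if_neg h]
      have hs := pv_shift w rest [run] [] [p]
      simp only [List.append_nil] at hs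
      simp only [List.nil_append, hs]
      have hassoc : ([run] ++ (rest.foldl (pvStep w) ([], [p])).1)
          ++ [(rest.foldl (pvStep w) ([], [p])).2]
          = run :: ((rest.foldl (pvStep w) ([], [p])).1
            ++ [(rest.foldl (pvStep w) ([], [p])).2]) := by simp
      rw [hassoc]
      show run.map (fun p => (p, (k : Int))) ++ pvNumb (k + 1) _ = _
      rw [ih [p] (k + 1) p (by simp) (by
        have := PySem.List.pyGetD_neg_one_append_singleton (xs := ([] : List Int)) (x := p) (d := (0:Int))
        simpa using this)]
      simp only [List.map_cons, List.map_nil, List.singleton_append, pvPairs, ne_eq, h,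
        not_false_eq_true, if_pos]
      push_cast
      simp

lemma pv_scat_append (eqc : List Int) (l1 l2 : List (Int × Int)) :
    pvScat eqc (l1 ++ l2) = pvScat (pvScat eqc l1) l2 := by
  simp [pvScat, List.foldl_append]

lemma pv_scat_map (eqc : List Int) (r : List Int) (m : Int) :
    r.foldl (fun e p => PySem.List.pySetD e p m) eqc = pvScat eqc (r.map (fun p => (p, m))) := by
  simp [pvScat, List.foldl_map]

-- the numbered double scatter fold equals a single scatter of the numbered pairs
lemma pv_numb_scat :
    ∀ (rs : List (List Int)) (k : Nat) (eqc : List Int),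
      (rs.zipIdx k).foldl (fun eqc rg =>
        rg.1.foldl (fun eqc p => PySem.List.pySetD eqc p ((rg.2 : Int))) eqc) eqc
      = pvScat eqc (pvNumb k rs) := by
  intro rs
  induction rs with
  | nil => intro k eqc; rfl
  | cons r rs ih =>
    intro k eqc
    simp only [List.zipIdx_cons, List.foldl_cons, pvNumb, pv_scat_append]
    rw [← pv_scat_map]
    exact ih (k + 1) _

lemma pv_take_map (order : List Int) (n : Nat) (h : n ≤ order.length) :
    order.take n = (List.range' 0 n).map (pvG order) := by
  apply List.ext_getElem
  · simp [List.length_take]; omega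
  · intro j hj1 hj2
    simp only [List.getElem_take, List.getElem_map, List.getElem_range']
    simp only [List.length_take] at hj1
    have hjl : j < order.length := by omega
    simp [pvG, PySem.List.pyGetD_natCast, List.getD_eq_getElem?_getD,
      List.getElem?_eq_getElem hjl]


lemma pv_scat_cons (eqc : List Int) (pc : Int × Int) (l : List (Int × Int)) :
    pvScat eqc (pc :: l) = pvScat (PySem.List.pySetD eqc pc.1 pc.2) l := rfl

lemma pvH (word : String) (order : List Int)
    (hl : word.toList.length ≤ order.length)
    (hb : ∀ p ∈ order.take word.toList.length,
      -(word.toList.length : Int) ≤ p ∧ p < (word.toList.length : Int)) :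
    ∀ j : Nat, j < word.toList.length →
      -(word.toList.length : Int) ≤ pvG order j ∧ pvG order j < (word.toList.length : Int) := by
  intro j hj
  have hjl : j < order.length := lt_of_lt_of_le hj hl
  have hg : pvG order j = order[j] := by
    simp [pvG, PySem.List.pyGetD_natCast, List.getD_eq_getElem?_getD,
      List.getElem?_eq_getElem hjl]
  rw [hg]
  refine hb _ ?_
  have hjt : j < (order.take word.toList.length).length := by
    simp only [List.length_take]; omega
  have : (order.take word.toList.length)[j]'hjt = order[j] := List.getElem_take
  rw [← this]
  exact List.getElem_mem hjt

lemma pvA_eq (w : String) (order : List Int) (hw : w.toList ≠ [])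
    (H : ∀ j : Nat, j < w.toList.length →
      -(w.toList.length : Int) ≤ pvG order j ∧ pvG order j < (w.toList.length : Int)) :
    compute_char_classes_py w order
      = pvScat (List.replicate w.toList.length (0 : Int))
          ((PySem.List.pyGetD order 0 0, (0 : Int)) ::
            pvPairs w 0 (PySem.List.pyGetD order 0 0)
              ((List.range' 1 (w.toList.length - 1)).map (pvG order))) := by
  have hn : 0 < w.toList.length := List.length_pos_of_ne_nil hw
  have hws : w ≠ "" := fun h0 => hw (h0 ▸ rfl)
  unfold compute_char_classes_py
  rw [if_neg (by simp [PySem.Str.len_eq, hws])]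
  show (PySem.List.pyRange 1 ((w.toList.length : Nat) : Int) 1).foldl (fun eqc i =>
      if PySem.Str.pyGet? w (PySem.List.pyGetD order i 0)
         ≠ PySem.Str.pyGet? w (PySem.List.pyGetD order (i - 1) 0) then
        PySem.List.pySetD eqc (PySem.List.pyGetD order i 0)
          (PySem.List.pyGetD eqc (PySem.List.pyGetD order (i - 1) 0) 0 + 1)
      else
        PySem.List.pySetD eqc (PySem.List.pyGetD order i 0)
          (PySem.List.pyGetD eqc (PySem.List.pyGetD order (i - 1) 0) 0))
      (PySem.List.pySetD (List.replicate w.toList.length (0 : Int))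
        (PySem.List.pyGetD order 0 0) 0) = _
  have hg0 : pvG order 0 = PySem.List.pyGetD order 0 0 := by simp [pvG]
  have hlen1 : (PySem.List.pySetD (List.replicate w.toList.length (0 : Int))
      (PySem.List.pyGetD order 0 0) 0).length = w.toList.length := by
    rw [PySem.List.length_pySetD, List.length_replicate]
  have hb0 := H 0 hn
  rw [hg0] at hb0
  have hc0 : PySem.List.pyGetD (PySem.List.pySetD (List.replicate w.toList.length (0 : Int))
      (PySem.List.pyGetD order 0 0) 0) (PySem.List.pyGetD order (((1 : Nat) : Int) - 1) 0) 0
      = (0 : Int) := by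
    have e : (((1 : Nat) : Int) - 1) = (0 : Int) := by norm_num
    rw [e]
    exact pv_get_set_self _ _ _ _ (by simpa using hb0.1) (by simpa using hb0.2)
  have hloop := pvA_loop w order w.toList.length H (w.toList.length - 1) 1 _ 0
    (le_refl 1) (by omega) hlen1 hc0
  have e1 : ((1 + (w.toList.length - 1) : Nat) : Int) = ((w.toList.length : Nat) : Int) := by
    omega
  have e2 : (((1 : Nat) : Int)) = (1 : Int) := by norm_num
  rw [e1, e2] at hloop
  have e3 : ((1 : Int) - 1) = (0 : Int) := by norm_num
  rw [e3] at hloop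
  rw [hloop]
  rw [pv_scat_cons]

lemma pvB_eq (w : String) (order : List Int) (hw : w.toList ≠ [])
    (hl : w.toList.length ≤ order.length) :
    compute_char_classes_py_alt w order
      = pvScat (List.replicate w.toList.length (0 : Int))
          ((PySem.List.pyGetD order 0 0, (0 : Int)) ::
            pvPairs w 0 (PySem.List.pyGetD order 0 0)
              ((List.range' 1 (w.toList.length - 1)).map (pvG order))) := by
  have hn : 0 < w.toList.length := List.length_pos_of_ne_nil hw
  have hws : w ≠ "" := fun h0 => hw (h0 ▸ rfl)
  unfold compute_char_classes_py_alt
  rw [if_neg (by simp [PySem.Str.len_eq, hws])]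
  have hps : PySem.List.slice order none (some ((w.toList.length : Nat) : Int))
      = pvG order 0 :: (List.range' 1 (w.toList.length - 1)).map (pvG order) := by
    rw [PySem.List.slice_to_natCast, pv_take_map order _ hl]
    have e : w.toList.length = (w.toList.length - 1) + 1 := by omega
    rw [e, List.range'_succ]
    simp
  simp only [hps]
  have hstep : (fun (st : List (List Int) × List Int) p =>
      if PySem.Str.pyGet? w p = PySem.Str.pyGet? w (PySem.List.pyGetD st.2 (-1) 0)
      then (st.1, st.2 ++ [p])
      else (st.1 ++ [st.2], [p])) = pvStep w := rfl
  rw [hstep, pv_numb_scat]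
  have hq0 : PySem.List.pyGetD [pvG order 0] (-1) 0 = pvG order 0 := by
    have := PySem.List.pyGetD_neg_one_append_singleton (xs := ([] : List Int))
      (x := pvG order 0) (d := (0 : Int))
    simpa using this
  rw [pv_runs w ((List.range' 1 (w.toList.length - 1)).map (pvG order))
    [pvG order 0] 0 (pvG order 0) (by simp) hq0]
  have hg0 : pvG order 0 = PySem.List.pyGetD order 0 0 := by simp [pvG]
  simp [hg0]

-- ===== VERDICT (by name: the statement is the Claim_ definition above) =====
theorem compute_char_classes_py_spec : Claim_equal_compute_char_classes_py := by
  intro word order _ hpre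
  unfold Spec_compute_char_classes_py
  by_cases hw : word.toList = []
  · unfold compute_char_classes_py compute_char_classes_py_alt
    rw [if_pos (by simp [PySem.Str.len_eq, hw]), if_pos (by simp [PySem.Str.len_eq, hw])]
  · rcases hpre with he | ⟨hl, hb⟩
    · exact absurd he hw
    · rw [pvA_eq word order hw (pvH word order hl hb), pvB_eq word order hw hl]
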